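-- pv_equiv track=rewrite | github.com/longytravel/bankingCommunicationSystem | src/core/input_cleaner.py | _clean_content_flow
-- ===== SOURCE A (Python) =====
-- from typing import Dict, Any, List, Optional, Tuple
--
-- def _clean_content_flow(content: str, artifacts_removed: List[str]) -> str:
--     """Clean up content flow, removing orphaned sections and fixing structure"""
--     lines = content.split('\n')
--     cleaned_lines = []
--
--     i = 0
--     while i < len(lines):
--         line = lines[i].strip()
--
--         # Skip empty placeholder sections
--         if line == '' and i < len(lines) - 1:
--             # Look ahead to see if next non-empty line makes sense
--             next_content_line = None
--             j = i + 1
--             while j < len(lines) and not lines[j].strip():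
--                 j += 1
--             if j < len(lines):
--                 next_content_line = lines[j].strip()
--
--             # If next line starts with a greeting after we already have content,
--             # this might be a duplicate structure issue
--             if (next_content_line and next_content_line.startswith('Dear ') and
--                 any('Dear ' in prev_line for prev_line in cleaned_lines)):
--                 artifacts_removed.append("Removed duplicate greeting section")
--                 # Skip to the duplicate greeting and remove it
--                 i = j + 1
--                 continue
--
--         # Keep the line
--         cleaned_lines.append(lines[i])
--         i += 1
--
--     return '\n'.join(cleaned_lines)
-- ===== SOURCE B (Python) =====
-- from typing import List
--
-- def _clean_content_flow(content: str, artifacts_removed: List[str]) -> str: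
--     """Single forward pass: buffer blank lines in `pending`; drop a duplicate
--     'Dear ' greeting (and the blanks before it) when one was already emitted."""
--     cleaned_lines = []
--     pending = []
--     has_dear = False
--     for raw in content.split('\n'):
--         s = raw.strip()
--         if s == '':
--             pending.append(raw)
--         elif s.startswith('Dear ') and has_dear and pending:
--             artifacts_removed.append("Removed duplicate greeting section")
--             pending = []
--         else:
--             cleaned_lines.extend(pending)
--             pending = []
--             cleaned_lines.append(raw)
--             has_dear = has_dear or ('Dear ' in raw)
--     cleaned_lines.extend(pending)
--     return '\n'.join(cleaned_lines)
-- ===== Notes on version B (the rewrite author's own statement) =====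
-- stated objective: simpler
-- what changed: Replaced A's index-based while loop with a nested look-ahead scan over upcoming blank lines by a single forward pass that buffers consecutive blank lines in a pending list and tracks a has_dear flag, dropping the buffered blanks and the duplicate greeting when it is reached.
import Mathlib
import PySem

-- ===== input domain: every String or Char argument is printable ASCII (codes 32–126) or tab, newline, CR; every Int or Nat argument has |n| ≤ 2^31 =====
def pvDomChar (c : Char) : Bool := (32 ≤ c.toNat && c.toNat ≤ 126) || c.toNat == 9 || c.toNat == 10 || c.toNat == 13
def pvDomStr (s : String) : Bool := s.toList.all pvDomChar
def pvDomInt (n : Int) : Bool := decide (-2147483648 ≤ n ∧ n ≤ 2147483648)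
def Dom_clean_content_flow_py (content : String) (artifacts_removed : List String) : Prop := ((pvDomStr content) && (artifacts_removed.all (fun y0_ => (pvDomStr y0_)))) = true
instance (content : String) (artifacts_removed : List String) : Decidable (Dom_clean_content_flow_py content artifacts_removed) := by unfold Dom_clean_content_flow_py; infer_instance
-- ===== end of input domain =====

-- B replaces A's index loop with look-ahead by a single forward pass that buffers blank
-- lines and a has-greeting flag (objective: simpler). Both A and B append the same messages
-- to the caller's artifacts_removed list in Python; the theorems here are about the return value.

-- ===== PORT A =====

-- inner 'while j < len(lines) and not lines[j].strip(): j += 1'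
def pvFindNextA (lines : List String) (j : Nat) : Nat :=
  if h : j < lines.length then
    if PySem.Str.strip lines[j] = "" then pvFindNextA lines (j + 1) else j
  else j
termination_by lines.length - j

theorem pvFindNextA_ge (lines : List String) (j : Nat) : j ≤ pvFindNextA lines j := by
  unfold pvFindNextA
  split
  · split
    · have := pvFindNextA_ge lines (j + 1); omega
    · exact le_refl j
  · exact le_refl j
termination_by lines.length - j

-- outer while loop of A (cleaned is the accumulated cleaned_lines, i the index)
def pvLoopA (lines : List String) (cleaned : List String) (i : Nat) : List String :=
  if h : i < lines.length then
    let line := PySem.Str.strip lines[i]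
    if line = "" ∧ i < lines.length - 1 then
      let j := pvFindNextA lines (i + 1)
      let nc : Option String := if hj : j < lines.length then some (PySem.Str.strip lines[j]) else none
      if ((nc.map (fun s => (!(s == "")) && PySem.Str.startswith s "Dear ")).getD false
            && cleaned.any (fun p => PySem.Str.isIn "Dear " p)) = true then
        pvLoopA lines cleaned (j + 1)
      else
        pvLoopA lines (cleaned ++ [lines[i]]) (i + 1)
    else
      pvLoopA lines (cleaned ++ [lines[i]]) (i + 1)
  else cleaned
termination_by lines.length - i
decreasing_by
  · have := pvFindNextA_ge lines (i + 1); omega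
  · omega
  · omega

def clean_content_flow_py (content : String) (artifacts_removed : List String) : String :=
  PySem.Str.join "\n" (pvLoopA (((PySem.Str.split? content "\n").getD [])) [] 0)

-- ===== PORT B =====

-- one step of B's single forward pass; state = (cleaned_lines, pending blanks, has_dear)
def pvStepB (st : List String × List String × Bool) (raw : String) : List String × List String × Bool :=
  let s := PySem.Str.strip raw
  if s == "" then (st.1, st.2.1 ++ [raw], st.2.2)
  else if PySem.Str.startswith s "Dear " && st.2.2 && !(st.2.1 == ([] : List String)) then
    (st.1, ([] : List String), st.2.2)
  else (st.1 ++ st.2.1 ++ [raw], ([] : List String), st.2.2 || PySem.Str.isIn "Dear " raw)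

def clean_content_flow_py_alt (content : String) (artifacts_removed : List String) : String :=
  let st := (((PySem.Str.split? content "\n").getD [])).foldl pvStepB ([], [], false)
  PySem.Str.join "\n" (st.1 ++ st.2.1)

-- ===== PRECONDITION & SPEC =====
def Spec_clean_content_flow_py (content : String) (artifacts_removed : List String) (out : String) : Prop := out = clean_content_flow_py_alt content artifacts_removed
instance (content : String) (artifacts_removed : List String) (out : String) : Decidable (Spec_clean_content_flow_py content artifacts_removed out) := by unfold Spec_clean_content_flow_py; infer_instance

-- ===== CLAIM (what is proved, stated in full; the proofs are below) =====
def Claim_equal_clean_content_flow_py : Prop := ∀ (content : String) (artifacts_removed : List String), Dom_clean_content_flow_py content artifacts_removed → Spec_clean_content_flow_py content artifacts_removed (clean_content_flow_py content artifacts_removed)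

-- ===== LEMMAS AND PROOFS =====

-- does the first non-blank line of the suffix start with 'Dear '?
def pvGreetNext : List String → Bool
  | [] => false
  | r :: rest =>
      if PySem.Str.strip r = "" then pvGreetNext rest
      else PySem.Str.startswith (PySem.Str.strip r) "Dear "

-- a whitespace-only line cannot contain 'Dear '
theorem pv_blank_no_dear (s : String) (h : PySem.Str.strip s = "") :
    PySem.Str.isIn "Dear " s = false := by
  by_contra hne
  have ht : PySem.Str.isIn "Dear " s = true := by
    cases hb : PySem.Str.isIn "Dear " s
    · exact absurd hb hne
    · rfl
  rw [PySem.Str.isIn_iff_infix] at ht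
  have hD : 'D' ∈ s.toList := ht.subset (by decide)
  have h' : PySem.Chars.strip s.toList = [] := by
    have := congrArg String.toList h
    rwa [PySem.Str.toList_strip] at this
  unfold PySem.Chars.strip PySem.Chars.rstrip PySem.Chars.lstrip at h'
  have h2 : List.dropWhile PySem.Chars.isspace
      ((List.dropWhile PySem.Chars.isspace s.toList).reverse) = [] := by
    simpa using congrArg List.reverse h'
  rw [List.dropWhile_eq_nil_iff] at h2
  have hall : PySem.Chars.isspace 'D' = true := by
    rcases List.mem_append.mp (by
        rw [List.takeWhile_append_dropWhile]; exact hD :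
        'D' ∈ List.takeWhile PySem.Chars.isspace s.toList ++
          List.dropWhile PySem.Chars.isspace s.toList) with hm | hm
    · exact List.mem_takeWhile_imp hm
    · exact h2 _ (List.mem_reverse.mpr hm)
  exact absurd hall (by decide)

-- A's look-ahead condition is pvGreetNext of the suffix
theorem pvGreetNext_cons (r : String) (rest : List String) :
    pvGreetNext (r :: rest)
      = if PySem.Str.strip r = "" then pvGreetNext rest
        else PySem.Str.startswith (PySem.Str.strip r) "Dear " := rfl

theorem pv_findNext_greet (lines : List String) (k : Nat) (hk : k ≤ lines.length) :
    ((if hj : pvFindNextA lines k < lines.length then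
        some (PySem.Str.strip lines[pvFindNextA lines k]) else none).map
      (fun s => (!(s == "")) && PySem.Str.startswith s "Dear ")).getD false
      = pvGreetNext (lines.drop k) := by
  by_cases h : k < lines.length
  · rw [List.drop_eq_getElem_cons h]
    by_cases hb : PySem.Str.strip lines[k] = ""
    · have e : pvFindNextA lines k = pvFindNextA lines (k + 1) := by
        rw [pvFindNextA, dif_pos h, if_pos hb]
      rw [e]
      rw [pvGreetNext_cons, if_pos hb]
      exact pv_findNext_greet lines (k + 1) (by omega)
    · have e : pvFindNextA lines k = k := by
        rw [pvFindNextA, dif_pos h, if_neg hb]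
      rw [e, dif_pos h]
      show ((!(PySem.Str.strip lines[k] == "")) && PySem.Str.startswith (PySem.Str.strip lines[k]) "Dear ")
          = pvGreetNext (lines[k] :: lines.drop (k + 1))
      rw [pvGreetNext_cons, if_neg hb]
      simp [hb]
  · have hk' : k = lines.length := by omega
    subst hk'
    rw [List.drop_length]
    have e : pvFindNextA lines lines.length = lines.length := by
      rw [pvFindNextA, dif_neg h]
    rw [e, dif_neg h]
    rfl
termination_by lines.length - k

theorem pvFindNextA_le (lines : List String) (k : Nat) (hk : k ≤ lines.length) :
    pvFindNextA lines k ≤ lines.length := by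
  unfold pvFindNextA
  split
  · split
    · exact pvFindNextA_le lines (k + 1) (by omega)
    · omega
  · omega
termination_by lines.length - k

-- B's pass consumes a blank run followed by a dropped duplicate greeting
theorem pv_foldB_skip (lines : List String) (i : Nat) (cb pending : List String)
    (hk : i ≤ lines.length) (hg : pvGreetNext (lines.drop i) = true) (hp : pending ≠ []) :
    (lines.drop i).foldl pvStepB (cb, pending, true)
      = (lines.drop (pvFindNextA lines i + 1)).foldl pvStepB (cb, [], true) := by
  have h : i < lines.length := by
    by_contra hlt
    rw [show lines.drop i = [] from List.drop_eq_nil_of_le (by omega)] at hg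
    exact absurd hg (by decide)
  rw [List.drop_eq_getElem_cons h] at hg ⊢
  rw [List.foldl_cons]
  by_cases hb : PySem.Str.strip lines[i] = ""
  · have e : pvFindNextA lines i = pvFindNextA lines (i + 1) := by
      rw [pvFindNextA, dif_pos h, if_pos hb]
    rw [pvGreetNext_cons, if_pos hb] at hg
    have estep : pvStepB (cb, pending, true) lines[i] = (cb, pending ++ [lines[i]], true) := by
      simp [pvStepB, hb]
    rw [estep, e]
    exact pv_foldB_skip lines (i + 1) cb (pending ++ [lines[i]]) (by omega) hg (by simp)
  · have e : pvFindNextA lines i = i := by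
      rw [pvFindNextA, dif_pos h, if_neg hb]
    rw [pvGreetNext_cons, if_neg hb] at hg
    have estep : pvStepB (cb, pending, true) lines[i] = (cb, [], true) := by
      simp [pvStepB, hb, hp]
      simpa using hg
    rw [estep, e]
termination_by lines.length - i

-- main invariant: A's loop from index i equals B's pass over the remaining suffix
theorem pvLoopA_succ (lines c : List String) (i : Nat) (h : i < lines.length) :
    pvLoopA lines c i =
      if PySem.Str.strip lines[i] = "" ∧ i < lines.length - 1 then
        (if (((if hj : pvFindNextA lines (i + 1) < lines.length then
                  some (PySem.Str.strip lines[pvFindNextA lines (i + 1)]) else none).map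
                (fun s => (!(s == "")) && PySem.Str.startswith s "Dear ")).getD false
              && c.any (fun p => PySem.Str.isIn "Dear " p)) = true then
          pvLoopA lines c (pvFindNextA lines (i + 1) + 1)
        else pvLoopA lines (c ++ [lines[i]]) (i + 1))
      else pvLoopA lines (c ++ [lines[i]]) (i + 1) := by
  rw [pvLoopA, dif_pos h]

theorem pv_main (lines : List String) (i : Nat) (cb pending : List String) (flag : Bool)
    (hi : i ≤ lines.length)
    (hblank : ∀ p ∈ pending, PySem.Str.strip p = "")
    (hflag : flag = cb.any (fun p => PySem.Str.isIn "Dear " p))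
    (hnd : pending ≠ [] → ¬ (flag = true ∧ pvGreetNext (lines.drop i) = true)) :
    pvLoopA lines (cb ++ pending) i
      = ((lines.drop i).foldl pvStepB (cb, pending, flag)).1
          ++ ((lines.drop i).foldl pvStepB (cb, pending, flag)).2.1 := by
  by_cases hI : i < lines.length
  · rw [List.drop_eq_getElem_cons hI, List.foldl_cons, pvLoopA_succ lines (cb ++ pending) i hI]
    have hpend_any : pending.any (fun p => PySem.Str.isIn "Dear " p) = false := by
      rw [List.any_eq_false]
      intro p hp
      simpa using pv_blank_no_dear p (hblank p hp)
    have hany : (cb ++ pending).any (fun p => PySem.Str.isIn "Dear " p) = flag := by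
      rw [List.any_append, hpend_any, ← hflag, Bool.or_false]
    by_cases hb : PySem.Str.strip lines[i] = ""
    · have estep : pvStepB (cb, pending, flag) lines[i] = (cb, pending ++ [lines[i]], flag) := by
        simp [pvStepB, hb]
      rw [estep]
      have hblank' : ∀ p ∈ pending ++ [lines[i]], PySem.Str.strip p = "" := by
        intro p hp
        rcases List.mem_append.mp hp with hm | hm
        · exact hblank p hm
        · rw [List.mem_singleton.mp hm]; exact hb
      by_cases hlast : i < lines.length - 1
      · rw [if_pos ⟨hb, hlast⟩, pv_findNext_greet lines (i + 1) (by omega), hany]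
        by_cases hcond : (pvGreetNext (lines.drop (i + 1)) && flag) = true
        · have hg : pvGreetNext (lines.drop (i + 1)) = true := (Bool.and_eq_true _ _ |>.mp hcond).1
          have hf : flag = true := (Bool.and_eq_true _ _ |>.mp hcond).2
          have hpe : pending = [] := by
            by_contra hne
            exact (hnd hne) ⟨hf, by
              rw [List.drop_eq_getElem_cons hI, pvGreetNext_cons, if_pos hb]; exact hg⟩
          have hjlt : pvFindNextA lines (i + 1) < lines.length := by
            by_contra hge
            have := pv_findNext_greet lines (i + 1) (by omega)
            rw [dif_neg hge] at this
            rw [← this] at hg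
            exact absurd hg (by decide)
          subst hpe
          subst hf
          rw [if_pos hcond]
          rw [pv_foldB_skip lines (i + 1) cb ([] ++ [lines[i]]) (by omega) hg (by simp)]
          have := pv_main lines (pvFindNextA lines (i + 1) + 1) cb [] true (by omega)
            (by intro p hp; cases hp) hflag (by intro hne; exact absurd rfl hne)
          simpa using this
        · rw [if_neg hcond, List.append_assoc]
          exact pv_main lines (i + 1) cb (pending ++ [lines[i]]) flag (by omega) hblank' hflag
            (by
              intro _ hcc
              exact hcond (by rw [hcc.2, hcc.1]; rfl))
      · rw [if_neg (by tauto), List.append_assoc]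
        exact pv_main lines (i + 1) cb (pending ++ [lines[i]]) flag (by omega) hblank' hflag
          (by
            intro _ hcc
            have : lines.drop (i + 1) = [] := List.drop_eq_nil_of_le (by omega)
            rw [this] at hcc
            exact absurd hcc.2 (by decide))
    · rw [if_neg (by tauto)]
      have hstep2 : (PySem.Str.startswith (PySem.Str.strip lines[i]) "Dear " && flag
          && !(pending == ([] : List String))) = false := by
        by_cases hpe : pending = []
        · simp [hpe]
        · have hng := hnd hpe
          rw [List.drop_eq_getElem_cons hI, pvGreetNext_cons, if_neg hb] at hng
          cases hsw : PySem.Str.startswith (PySem.Str.strip lines[i]) "Dear "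
          · simp
          · cases hfl : flag
            · simp
            · subst hfl
              exact absurd ⟨rfl, hsw⟩ hng
      have estep : pvStepB (cb, pending, flag) lines[i]
          = (cb ++ pending ++ [lines[i]], ([] : List String),
             flag || PySem.Str.isIn "Dear " lines[i]) := by
        simp only [pvStepB]
        rw [if_neg (by simp only [beq_iff_eq]; exact hb), if_neg (by rw [hstep2]; simp)]
      rw [estep]
      have hflag' : (flag || PySem.Str.isIn "Dear " lines[i])
          = (cb ++ pending ++ [lines[i]]).any (fun p => PySem.Str.isIn "Dear " p) := by
        rw [List.any_append, List.any_append, hpend_any, ← hflag]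
        simp
      have := pv_main lines (i + 1) (cb ++ pending ++ [lines[i]]) []
        (flag || PySem.Str.isIn "Dear " lines[i]) (by omega)
        (by intro p hp; cases hp) hflag' (by intro hne; exact absurd rfl hne)
      simpa using this
  · rw [pvLoopA, dif_neg hI, List.drop_eq_nil_of_le (by omega), List.foldl_nil]
termination_by lines.length - i
decreasing_by
  · have := pvFindNextA_ge lines (i + 1); omega
  · omega
  · omega
  · omega

-- ===== VERDICT (by name: the statement is the Claim_ definition above) =====
theorem clean_content_flow_py_spec : Claim_equal_clean_content_flow_py := by
  intro content artifacts_removed _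
  unfold Spec_clean_content_flow_py clean_content_flow_py clean_content_flow_py_alt
  have h := pv_main ((PySem.Str.split? content "\n").getD []) 0 [] [] false (by omega)
    (by intro p hp; cases hp) (by simp) (by intro h; cases h rfl)
  simp only [List.nil_append, List.drop_zero] at h
  show PySem.Str.join "\n" (pvLoopA ((PySem.Str.split? content "\n").getD []) [] 0)
      = PySem.Str.join "\n"
          ((((PySem.Str.split? content "\n").getD []).foldl pvStepB ([], [], false)).1
            ++ ((((PySem.Str.split? content "\n").getD []).foldl pvStepB ([], [], false)).2.1))
  rw [h]
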